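-- pv_equiv track=rewrite | github.com/taswani/interview_prep | min_roundtrip_cost.py | min_roundtrip_cost
-- ===== SOURCE A (Python) =====
-- from typing import List
--
-- def min_roundtrip_cost(D: List[int], R: List[int]) -> int:
--     if not D or not R or len(D) != len(R):
--         raise ValueError("Arrays must be non-empty and same length")
--
--     min_departure = float('inf')
--     min_round_trip = float('inf')
--
--     for idx in range(len(D)):
--         min_departure = min(D[idx], min_departure)
--
--         min_round_trip = min(min_departure + R[idx], min_round_trip)
--
--     return min_round_trip
-- ===== SOURCE B (Python) =====
-- from typing import List
--
-- def min_roundtrip_cost(D: List[int], R: List[int]) -> int: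
--     if not D or not R or len(D) != len(R):
--         raise ValueError("Arrays must be non-empty and same length")
--     # pass 1: prefix minima of D
--     P = []
--     running = float('inf')
--     for d in D:
--         running = min(d, running)
--         P.append(running)
--     # pass 2: best prefix-min departure plus return at each index
--     best = float('inf')
--     for p, r in zip(P, R):
--         best = min(p + r, best)
--     return best
-- ===== Notes on version B (the rewrite author's own statement) =====
-- stated objective: alternative
-- what changed: Replaced A's single fused loop carrying two running minima with two separately-shaped passes: first build an explicit prefix-minimum list P of D, then minimize P[j]+R[j] over a zip of P and R.
import Mathlib
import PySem

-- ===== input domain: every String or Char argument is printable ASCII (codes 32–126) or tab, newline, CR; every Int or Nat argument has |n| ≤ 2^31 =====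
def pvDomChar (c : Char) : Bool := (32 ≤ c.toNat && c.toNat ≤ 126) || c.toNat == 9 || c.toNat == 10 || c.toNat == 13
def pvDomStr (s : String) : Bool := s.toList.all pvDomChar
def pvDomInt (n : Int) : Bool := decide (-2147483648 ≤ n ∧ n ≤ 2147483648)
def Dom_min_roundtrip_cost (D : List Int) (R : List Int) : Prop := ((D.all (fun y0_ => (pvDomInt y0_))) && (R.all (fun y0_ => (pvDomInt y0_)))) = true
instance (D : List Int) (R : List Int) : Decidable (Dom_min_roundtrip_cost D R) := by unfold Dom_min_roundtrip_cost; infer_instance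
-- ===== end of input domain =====

-- B replaces A's single fused loop with two separate passes (an explicit prefix-minimum
-- list of D, then a minimization over its zip with R); alternative decomposition, same cost.


-- `none` stands for float('inf'); `omin` is Python's `min` with that seed
def omin : Option Int → Option Int → Option Int
  | none, b => b
  | some x, none => some x
  | some x, some y => some (min x y)

-- ===== PORT A =====
-- A raises ValueError under the guard; the port returns 0 there (excluded by Pre_).
def min_roundtrip_cost (D : List Int) (R : List Int) : Int :=
  if D = [] ∨ R = [] ∨ D.length ≠ R.length then 0
  else
    let st := (List.range D.length).foldl
      (fun (st : Option Int × Option Int) idx =>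
        let md := omin (some (D.getD idx 0)) st.1
        let mrt := omin (md.map (· + R.getD idx 0)) st.2
        (md, mrt)) (none, none)
    st.2.getD 0

-- ===== PORT B =====
def min_roundtrip_cost_alt (D : List Int) (R : List Int) : Int :=
  if D = [] ∨ R = [] ∨ D.length ≠ R.length then 0
  else
    -- pass 1: prefix minima of D (append-accumulating fold, as in Source B)
    let P := (D.foldl (fun (acc : List (Option Int) × Option Int) d =>
        let run := omin (some d) acc.2
        (acc.1 ++ [run], run)) ([], none)).1
    -- pass 2: minimize P[j] + R[j] over the zip
    let best := (P.zip R).foldl (fun m pr => omin (pr.1.map (· + pr.2)) m) none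
    best.getD 0

-- ===== PRECONDITION & SPEC =====
-- Pre_ excludes exactly the inputs on which A raises ValueError (empty list or length mismatch).
def Pre_min_roundtrip_cost (D : List Int) (R : List Int) : Prop :=
  D ≠ [] ∧ R ≠ [] ∧ D.length = R.length
instance (D : List Int) (R : List Int) : Decidable (Pre_min_roundtrip_cost D R) := by
  unfold Pre_min_roundtrip_cost; infer_instance
def pvWitness_min_roundtrip_cost : List Int × List Int := ([3, 1, 4], [2, 5, 1])

def Spec_min_roundtrip_cost (D : List Int) (R : List Int) (out : Int) : Prop := out = min_roundtrip_cost_alt D R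
instance (D : List Int) (R : List Int) (out : Int) : Decidable (Spec_min_roundtrip_cost D R out) := by unfold Spec_min_roundtrip_cost; infer_instance

-- ===== CLAIM (what is proved, stated in full; the proofs are below) =====
def Claim_equal_min_roundtrip_cost : Prop := ∀ (D : List Int) (R : List Int), Dom_min_roundtrip_cost D R → Pre_min_roundtrip_cost D R → Spec_min_roundtrip_cost D R (min_roundtrip_cost D R)

-- ===== LEMMAS AND PROOFS =====

-- A's loop, rephrased over paired elements
def stepP (st : Option Int × Option Int) (pr : Int × Int) : Option Int × Option Int :=
  let md := omin (some pr.1) st.1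
  (md, omin (md.map (· + pr.2)) st.2)

-- pure scan of prefix minima
def scanMin : Option Int → List Int → List (Option Int)
  | _, [] => []
  | run, d :: ds => let r := omin (some d) run; r :: scanMin r ds

theorem bscan_fst (D : List Int) (acc : List (Option Int)) (run : Option Int) :
    (D.foldl (fun (acc : List (Option Int) × Option Int) d =>
        let r := omin (some d) acc.2
        (acc.1 ++ [r], r)) (acc, run)).1 = acc ++ scanMin run D := by
  induction D generalizing acc run with
  | nil => simp [scanMin]
  | cons d ds ih => simp [List.foldl_cons, scanMin, ih]

theorem range_fold_eq_zip (D : List Int) (R : List Int)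
    (h : D.length = R.length) (st : Option Int × Option Int) :
    (List.range D.length).foldl
      (fun (st : Option Int × Option Int) idx =>
        let md := omin (some (D.getD idx 0)) st.1
        let mrt := omin (md.map (· + R.getD idx 0)) st.2
        (md, mrt)) st
    = (D.zip R).foldl stepP st := by
  induction D generalizing R st with
  | nil => simp
  | cons d ds ih =>
    cases R with
    | nil => simp at h
    | cons r rs =>
      have h' : ds.length = rs.length := by simpa using h
      simp only [List.length_cons, List.range_succ_eq_map, List.foldl_cons, List.foldl_map,
        List.zip_cons_cons, List.getD_cons_zero, List.getD_cons_succ]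
      exact ih rs h' _

theorem zip_scan_fold (D : List Int) (R : List Int) (h : D.length = R.length)
    (md mrt : Option Int) :
    ((scanMin md D).zip R).foldl (fun m pr => omin (pr.1.map (· + pr.2)) m) mrt
    = ((D.zip R).foldl stepP (md, mrt)).2 := by
  induction D generalizing R md mrt with
  | nil => simp [scanMin]
  | cons d ds ih =>
    cases R with
    | nil => simp at h
    | cons r rs =>
      have h' : ds.length = rs.length := by simpa using h
      simp only [scanMin, List.zip_cons_cons, List.foldl_cons, stepP]
      exact ih rs h' _ _

-- ===== VERDICT (by name: the statement is the Claim_ definition above) =====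
theorem min_roundtrip_cost_spec : Claim_equal_min_roundtrip_cost := by
  intro D R _ hpre
  obtain ⟨hD, hR, hlen⟩ := hpre
  unfold Spec_min_roundtrip_cost min_roundtrip_cost min_roundtrip_cost_alt
  rw [if_neg (by simp [hD, hR, hlen]), if_neg (by simp [hD, hR, hlen])]
  simp only
  rw [range_fold_eq_zip D R hlen, bscan_fst, List.nil_append, zip_scan_fold D R hlen]
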